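-- pv_equiv track=rewrite | github.com/SeyyidOS/CPRE | src/feature/center.py | count_pieces_in_center
-- ===== SOURCE A (Python) =====
-- FILES = ['a', 'b', 'c', 'd', 'e', 'f', 'g', 'h']
--
-- CENTER_SQUARES = {'d4', 'd5', 'e4', 'e5'}
--
-- def get_square(file_idx, row_idx):
--     if 0 <= file_idx < 8 and 1 <= row_idx <= 8:
--         return FILES[file_idx] + str(row_idx)
--     return None
--
-- def count_pieces_in_center(board_rows):
--     white_count = 0
--     black_count = 0
--     row_index = 8
--     for row in board_rows:
--         file_index = 0
--         for char in row:
--             if char.isdigit():  # Empty squares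
--                 file_index += int(char)
--             else:
--                 square = get_square(file_index, row_index)
--                 if square in CENTER_SQUARES:
--                     if char.isupper():  # White piece
--                         white_count += 1
--                     else:  # Black piece
--                         black_count += 1
--                 file_index += 1
--         row_index -= 1
--     return white_count, black_count
-- ===== SOURCE B (Python) =====
-- def _expand(row):
--     """Expand a FEN rank string into a cell list: digits become that many
--     empty cells (None), any other char occupies one cell."""
--     cells = []
--     for ch in row:
--         if ch.isdigit():
--             cells.extend([None] * int(ch))
--         else:
--             cells.append(ch)
--     return cells
--
--
-- def count_pieces_in_center(board_rows):
--     white = 0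
--     black = 0
--     for i in (3, 4):  # the board rows that carry ranks 5 and 4
--         if i < len(board_rows):
--             cells = _expand(board_rows[i])
--             for f in (3, 4):  # files d and e
--                 piece = cells[f] if f < len(cells) else None
--                 if piece is not None:
--                     if piece.isupper():
--                         white += 1
--                     else:
--                         black += 1
--     return white, black
-- ===== Notes on version B (the rewrite author's own statement) =====
-- stated objective: faster
-- what changed: Instead of one interleaved scan of every row with running file/row counters, square-name construction and set membership, B expands only the two board rows that can contain center squares (indices 3 and 4) into explicit cell lists and classifies the cells at files d/e (indices 3 and 4) by direct indexing; no square names or sets are built and the other rows are never scanned.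
import Mathlib
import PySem

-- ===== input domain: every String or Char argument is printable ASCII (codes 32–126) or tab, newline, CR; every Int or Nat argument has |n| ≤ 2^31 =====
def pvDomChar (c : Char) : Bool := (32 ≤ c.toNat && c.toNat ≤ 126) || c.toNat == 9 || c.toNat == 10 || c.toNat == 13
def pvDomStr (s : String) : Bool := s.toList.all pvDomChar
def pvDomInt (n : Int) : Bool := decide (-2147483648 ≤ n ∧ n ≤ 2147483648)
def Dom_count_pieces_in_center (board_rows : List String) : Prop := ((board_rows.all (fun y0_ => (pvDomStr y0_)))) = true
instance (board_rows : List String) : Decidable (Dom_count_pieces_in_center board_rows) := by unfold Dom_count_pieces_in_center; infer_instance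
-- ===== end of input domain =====

-- B (simpler): expands only the two board rows that can hold center squares into cell
-- lists and classifies the cells at files d/e by direct indexing, instead of A's
-- interleaved scan of every row building square names and testing set membership.

-- ===== PORT A =====

-- int(char) for a one-character digit string; both Pythons call int(ch) (shared helper).
-- getD is exact here: it is only reached under isdigit, where ofChars? is some.
def pyDigitVal (char : Char) : Int := (PySem.Int.ofChars? [char]).getD 0

def pvFILES : List (List Char) := [['a'], ['b'], ['c'], ['d'], ['e'], ['f'], ['g'], ['h']]

def pvCENTER_SQUARES : PySem.Set (List Char) :=
  PySem.Set.ofList [['d','4'], ['d','5'], ['e','4'], ['e','5']]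

def get_square (file_idx row_idx : Int) : Option (List Char) :=
  if 0 ≤ file_idx ∧ file_idx < 8 ∧ 1 ≤ row_idx ∧ row_idx ≤ 8 then
    -- the guard puts file_idx in range, so the getD on pyGet? is exact
    some (((PySem.List.pyGet? pvFILES file_idx).getD []) ++ PySem.Int.toChars row_idx)
  else none

def count_pieces_in_center (board_rows : List String) : Int × Int :=
  let st :=
    board_rows.foldl
      (fun (st : (Int × Int) × Int) row =>
        let inner :=
          row.toList.foldl
            (fun (s : (Int × Int) × Int) char =>
              if PySem.Chars.isdigit char then
                (s.1, s.2 + pyDigitVal char)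
              else
                -- 'square in CENTER_SQUARES': None is never in the set of strings
                if (match get_square s.2 st.2 with
                    | some sq => PySem.Set.contains pvCENTER_SQUARES sq
                    | none => false) then
                  if PySem.Chars.isupper char then ((s.1.1 + 1, s.1.2), s.2 + 1)
                  else ((s.1.1, s.1.2 + 1), s.2 + 1)
                else (s.1, s.2 + 1))
            (st.1, 0)
        (inner.1, st.2 - 1))
      ((0, 0), 8)
  st.1

-- ===== PORT B =====

-- [None] * int(ch): a negative repeat count gives [] in Python, exactly replicate toNat
def pvExpand (row : List Char) : List (Option Char) :=
  row.foldl
    (fun cells ch =>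
      if PySem.Chars.isdigit ch then
        cells ++ List.replicate (pyDigitVal ch).toNat (none : Option Char)
      else cells ++ [some ch])
    []

-- the body of B's outer loop over the two candidate board rows
def bRowStep (board_rows : List String) (st : Int × Int) (i : Nat) : Int × Int :=
  if h : i < board_rows.length then
    let cells := pvExpand (board_rows[i].toList)
    ([3, 4] : List Nat).foldl
      (fun (st : Int × Int) f =>
        -- 'cells[f] if f < len(cells) else None' then 'if piece is not None'
        match cells[f]? with
        | some (some piece) =>
            if PySem.Chars.isupper piece then (st.1 + 1, st.2) else (st.1, st.2 + 1)
        | _ => st)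
      st
  else st

def count_pieces_in_center_alt (board_rows : List String) : Int × Int :=
  ([3, 4] : List Nat).foldl (bRowStep board_rows) (0, 0)

-- ===== PRECONDITION & SPEC =====
def Spec_count_pieces_in_center (board_rows : List String) (out : Int × Int) : Prop := out = count_pieces_in_center_alt board_rows
instance (board_rows : List String) (out : Int × Int) : Decidable (Spec_count_pieces_in_center board_rows out) := by unfold Spec_count_pieces_in_center; infer_instance

-- ===== CLAIM (what is proved, stated in full; the proofs are below) =====
def Claim_equal_count_pieces_in_center : Prop := ∀ (board_rows : List String), Dom_count_pieces_in_center board_rows → Spec_count_pieces_in_center board_rows (count_pieces_in_center board_rows)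

-- ===== LEMMAS AND PROOFS =====

-- the center-membership test of port A, as a function of file and rank
def pvHit (f r : Int) : Bool :=
  match get_square f r with
  | some sq => PySem.Set.contains pvCENTER_SQUARES sq
  | none => false

-- proof-side names for the two loop bodies of port A (definitionally equal to its lambdas)
def innerF (r : Int) : (Int × Int) × Int → Char → (Int × Int) × Int :=
  fun s char =>
    if PySem.Chars.isdigit char then
      (s.1, s.2 + pyDigitVal char)
    else
      if pvHit s.2 r then
        if PySem.Chars.isupper char then ((s.1.1 + 1, s.1.2), s.2 + 1)
        else ((s.1.1, s.1.2 + 1), s.2 + 1)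
      else (s.1, s.2 + 1)

def outerF : (Int × Int) × Int → String → (Int × Int) × Int :=
  fun st row => ((row.toList.foldl (innerF st.2) (st.1, 0)).1, st.2 - 1)

theorem A_eq (board_rows : List String) :
    count_pieces_in_center board_rows = (board_rows.foldl outerF ((0, 0), 8)).1 := rfl

-- pointwise pair sum
def addP (x y : Int × Int) : Int × Int := (x.1 + y.1, x.2 + y.2)

theorem addP_zero_left (x : Int × Int) : addP (0, 0) x = x := by simp [addP]
theorem addP_zero_right (x : Int × Int) : addP x (0, 0) = x := by simp [addP]
theorem addP_assoc (x y z : Int × Int) : addP (addP x y) z = addP x (addP y z) := by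
  simp only [addP, Prod.mk.injEq]
  constructor <;> ring

theorem digit_eval (c : Char) (h : PySem.Chars.isdigit c = true) :
    PySem.Int.ofChars? [c] = some ((c.toNat : Int) - 48) := by
  have hd : c = '0' ∨ c = '1' ∨ c = '2' ∨ c = '3' ∨ c = '4' ∨ c = '5' ∨ c = '6' ∨ c = '7' ∨ c = '8' ∨ c = '9' := by
    simp [PySem.Chars.isdigit, Char.le_def, UInt32.le_iff_toNat_le] at h
    simp only [Char.ext_iff, UInt32.ext_iff]
    simp
    omega
  rcases hd with h|h|h|h|h|h|h|h|h|h <;> subst h <;> decide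

theorem digit_nonneg (c : Char) (h : PySem.Chars.isdigit c = true) : 0 ≤ pyDigitVal c := by
  simp [pyDigitVal, digit_eval c h]
  have : 48 ≤ c.toNat := by
    simp [PySem.Chars.isdigit, Char.le_def, UInt32.le_iff_toNat_le] at h
    exact_mod_cast h.1
  omega

theorem digit_toNat_cast (c : Char) (h : PySem.Chars.isdigit c = true) :
    ((pyDigitVal c).toNat : Int) = pyDigitVal c :=
  Int.toNat_of_nonneg (digit_nonneg c h)

theorem pvHit_iff (f r : Int) : pvHit f r = true ↔ ((f = 3 ∨ f = 4) ∧ (r = 4 ∨ r = 5)) := by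
  unfold pvHit get_square
  by_cases hg : 0 ≤ f ∧ f < 8 ∧ 1 ≤ r ∧ r ≤ 8
  · rw [if_pos hg]
    obtain ⟨h1, h2, h3, h4⟩ := hg
    interval_cases f <;> interval_cases r <;> decide
  · rw [if_neg hg]
    constructor
    · intro hfalse; cases hfalse
    · intro hx; exfalso; omega

def pvContrib (c : Char) : Int × Int := if PySem.Chars.isupper c then (1, 0) else (0, 1)

-- what port A's inner loop contributes from a cell list placed at file offset f on rank r
def pvCnt (r : Int) : Int → List (Option Char) → Int × Int
  | _, [] => (0, 0)
  | f, none :: rest => pvCnt r (f + 1) rest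
  | f, some c :: rest =>
      addP (if pvHit f r then pvContrib c else (0, 0)) (pvCnt r (f + 1) rest)

def expandG (ch : Char) : List (Option Char) :=
  if PySem.Chars.isdigit ch then List.replicate (pyDigitVal ch).toNat (none : Option Char)
  else [some ch]

theorem pvExpand_eq (row : List Char) : pvExpand row = row.flatMap expandG := by
  unfold pvExpand
  have hfun : (fun (cells : List (Option Char)) ch =>
      if PySem.Chars.isdigit ch then
        cells ++ List.replicate (pyDigitVal ch).toNat (none : Option Char)
      else cells ++ [some ch]) = fun cells ch => cells ++ expandG ch := by
    funext cells ch
    unfold expandG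
    split <;> rfl
  rw [hfun, PySem.List.foldl_append_eq_flatMap]
  rfl

theorem pvCnt_replicate (r : Int) (k : Nat) : ∀ (f : Int) (rest : List (Option Char)),
    pvCnt r f (List.replicate k none ++ rest) = pvCnt r (f + k) rest := by
  induction k with
  | zero => intro f rest; simp
  | succ n ih =>
      intro f rest
      rw [List.replicate_succ, List.cons_append]
      show pvCnt r (f + 1) (List.replicate n none ++ rest) = _
      rw [ih]
      congr 1
      push_cast
      ring

theorem innerA_eq (r : Int) (cs : List Char) : ∀ (w b f : Int),
    cs.foldl (innerF r) ((w, b), f)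
      = (addP (w, b) (pvCnt r f (cs.flatMap expandG)), f + (cs.flatMap expandG).length) := by
  induction cs with
  | nil => intro w b f; simp [pvCnt, addP]
  | cons ch cs ih =>
      intro w b f
      rw [List.foldl_cons, List.flatMap_cons]
      by_cases hd : PySem.Chars.isdigit ch = true
      · have hstep : innerF r ((w, b), f) ch = ((w, b), f + pyDigitVal ch) := by
          simp [innerF, hd]
        rw [hstep, ih]
        rw [show expandG ch = List.replicate (pyDigitVal ch).toNat none from by
          simp [expandG, hd]]
        rw [pvCnt_replicate, digit_toNat_cast ch hd]
        refine Prod.ext rfl ?_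
        simp only [List.length_append, List.length_replicate, Nat.cast_add]
        rw [digit_toNat_cast ch hd]
        ring
      · have hstep : innerF r ((w, b), f) ch =
            (addP (w, b) (if pvHit f r then pvContrib ch else (0, 0)), f + 1) := by
          simp only [innerF, hd, if_false, Bool.false_eq_true]
          by_cases hh : pvHit f r = true
          · simp only [hh, if_true]
            by_cases hu : PySem.Chars.isupper ch = true <;>
              simp [hu, pvContrib, addP]
          · simp only [Bool.not_eq_true] at hh
            simp [hh, addP]
        rw [hstep]
        rw [show addP (w, b) (if pvHit f r then pvContrib ch else (0, 0))
              = (w + (if pvHit f r then pvContrib ch else (0, 0)).1,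
                 b + (if pvHit f r then pvContrib ch else (0, 0)).2) from rfl]
        rw [ih]
        rw [show expandG ch = [some ch] from by simp [expandG, hd]]
        rw [List.singleton_append]
        show _ = (addP (w, b) (addP (if pvHit f r then pvContrib ch else (0, 0))
            (pvCnt r (f + 1) (cs.flatMap expandG))), _)
        refine Prod.ext ?_ ?_
        · simp only [addP, Prod.mk.injEq]
          constructor <;> ring
        · simp [List.length_cons]
          ring

theorem pvCnt_zero (r : Int) (h4 : r ≠ 4) (h5 : r ≠ 5) :
    ∀ (cells : List (Option Char)) (f : Int), pvCnt r f cells = (0, 0) := by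
  intro cells
  induction cells with
  | nil => intro f; rfl
  | cons x rest ih =>
      intro f
      cases x with
      | none => exact ih (f + 1)
      | some c =>
          have hh : pvHit f r = false := by
            rw [← Bool.not_eq_true, pvHit_iff]
            rintro ⟨_, hr⟩
            rcases hr with hr | hr <;> omega
          show addP (if pvHit f r then pvContrib c else (0, 0)) (pvCnt r (f + 1) rest) = _
          rw [hh]
          simp only [Bool.false_eq_true, if_false, ih (f + 1), addP_zero_right]

-- the piece contribution of the cell at (Int) index i, none/out-of-range contributing zero
def contribAt (cells : List (Option Char)) (i : Int) : Int × Int :=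
  if 0 ≤ i then
    match cells[i.toNat]? with
    | some (some c) => pvContrib c
    | _ => (0, 0)
  else (0, 0)

theorem contribAt_neg (cells : List (Option Char)) (i : Int) (h : i < 0) :
    contribAt cells i = (0, 0) := by
  unfold contribAt
  rw [if_neg (by omega)]

theorem contribAt_nil (i : Int) : contribAt [] i = (0, 0) := by
  unfold contribAt
  split
  · simp
  · rfl

theorem contribAt_cons_zero (x : Option Char) (rest : List (Option Char)) :
    contribAt (x :: rest) 0 = (match x with | some c => pvContrib c | none => (0, 0)) := by
  unfold contribAt
  rw [if_pos le_rfl]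
  show (match (x :: rest)[(0 : Nat)]? with
        | some (some c) => pvContrib c | _ => (0, 0)) = _
  cases x <;> rfl

theorem contribAt_cons_ne (x : Option Char) (rest : List (Option Char)) (i : Int) (h : i ≠ 0) :
    contribAt (x :: rest) i = contribAt rest (i - 1) := by
  by_cases hneg : i < 0
  · rw [contribAt_neg _ _ hneg, contribAt_neg _ _ (by omega)]
  · have hpos : 0 < i := by omega
    unfold contribAt
    rw [if_pos (by omega), if_pos (by omega)]
    have ht : i.toNat = (i - 1).toNat + 1 := by omega
    rw [ht]
    rfl

theorem pvCnt_at (r : Int) (hr : r = 4 ∨ r = 5) :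
    ∀ (cells : List (Option Char)) (f : Int),
      pvCnt r f cells = addP (contribAt cells (3 - f)) (contribAt cells (4 - f)) := by
  intro cells
  induction cells with
  | nil => intro f; simp [pvCnt, contribAt_nil, addP]
  | cons x rest ih =>
      intro f
      cases x with
      | none =>
          show pvCnt r (f + 1) rest = _
          rw [ih (f + 1)]
          by_cases h3 : f = 3
          · subst h3
            rw [show (3 : Int) - (3 + 1) = -1 from by norm_num,
                show (4 : Int) - (3 + 1) = 0 from by norm_num,
                show (3 : Int) - 3 = 0 from by norm_num,
                show (4 : Int) - 3 = 1 from by norm_num,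
                contribAt_neg rest _ (by norm_num), contribAt_cons_zero,
                contribAt_cons_ne _ _ _ (by norm_num),
                show (1 : Int) - 1 = 0 from by norm_num]
            try simp [addP]
          · by_cases h4 : f = 4
            · subst h4
              rw [show (3 : Int) - (4 + 1) = -2 from by norm_num,
                  show (4 : Int) - (4 + 1) = -1 from by norm_num,
                  show (3 : Int) - 4 = -1 from by norm_num,
                  show (4 : Int) - 4 = 0 from by norm_num,
                  contribAt_neg rest (-2) (by norm_num), contribAt_neg rest (-1) (by norm_num),
                  contribAt_neg _ (-1) (by norm_num), contribAt_cons_zero]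
              try simp [addP]
            · rw [contribAt_cons_ne _ _ _ (by omega), contribAt_cons_ne _ _ _ (by omega)]
              congr 1 <;> congr 1 <;> ring
      | some c =>
          show addP (if pvHit f r then pvContrib c else (0, 0)) (pvCnt r (f + 1) rest) = _
          rw [ih (f + 1)]
          by_cases h3 : f = 3
          · subst h3
            have hh : pvHit 3 r = true := (pvHit_iff 3 r).mpr ⟨Or.inl rfl, hr⟩
            rw [hh,
                show (3 : Int) - (3 + 1) = -1 from by norm_num,
                show (4 : Int) - (3 + 1) = 0 from by norm_num,
                show (3 : Int) - 3 = 0 from by norm_num,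
                show (4 : Int) - 3 = 1 from by norm_num,
                contribAt_neg rest _ (by norm_num), contribAt_cons_zero,
                contribAt_cons_ne _ _ _ (by norm_num),
                show (1 : Int) - 1 = 0 from by norm_num]
            try simp [addP]
          · by_cases h4 : f = 4
            · subst h4
              have hh : pvHit 4 r = true := (pvHit_iff 4 r).mpr ⟨Or.inr rfl, hr⟩
              rw [hh,
                  show (3 : Int) - (4 + 1) = -2 from by norm_num,
                  show (4 : Int) - (4 + 1) = -1 from by norm_num,
                  show (3 : Int) - 4 = -1 from by norm_num,
                  show (4 : Int) - 4 = 0 from by norm_num,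
                  contribAt_neg rest (-2) (by norm_num), contribAt_neg rest (-1) (by norm_num),
                  contribAt_neg _ (-1) (by norm_num), contribAt_cons_zero]
              try simp [addP]
            · have hh : pvHit f r = false := by
                rw [← Bool.not_eq_true, pvHit_iff]
                rintro ⟨hf, _⟩
                rcases hf with hf | hf <;> omega
              rw [hh]
              simp only [Bool.false_eq_true, if_false, addP_zero_left]
              rw [contribAt_cons_ne _ _ _ (by omega), contribAt_cons_ne _ _ _ (by omega)]
              congr 1 <;> congr 1 <;> ring

-- the per-row sum A accumulates, starting at rank r
def S : List String → Int → Int × Int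
  | [], _ => (0, 0)
  | row :: rest, r => addP (pvCnt r 0 (pvExpand row.toList)) (S rest (r - 1))

theorem outer_eq (rows : List String) : ∀ (w b r : Int),
    rows.foldl outerF ((w, b), r) = (addP (w, b) (S rows r), r - rows.length) := by
  induction rows with
  | nil => intro w b r; simp [S, addP_zero_right]
  | cons row rest ih =>
      intro w b r
      rw [List.foldl_cons]
      have hstep : outerF ((w, b), r) row
          = (addP (w, b) (pvCnt r 0 (pvExpand row.toList)), r - 1) := by
        show ((row.toList.foldl (innerF r) ((w, b), 0)).1, r - 1) = _
        rw [innerA_eq]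
        rw [pvExpand_eq]
      rw [hstep]
      rw [show addP (w, b) (pvCnt r 0 (pvExpand row.toList))
            = ((w + (pvCnt r 0 (pvExpand row.toList)).1),
               (b + (pvCnt r 0 (pvExpand row.toList)).2)) from rfl]
      rw [ih]
      refine Prod.ext ?_ ?_
      · show _ = addP (w, b) (S (row :: rest) r)
        show _ = addP (w, b) (addP (pvCnt r 0 (pvExpand row.toList)) (S rest (r - 1)))
        rw [← addP_assoc]
        rfl
      · simp [List.length_cons]
        ring

-- A's contribution of the board row at Int index i, evaluated on rank r
def rowCnt (r : Int) (rows : List String) (i : Int) : Int × Int :=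
  if h : 0 ≤ i ∧ i.toNat < rows.length then
    pvCnt r 0 (pvExpand (rows[i.toNat]'h.2).toList)
  else (0, 0)

theorem rowCnt_nil (r i : Int) : rowCnt r [] i = (0, 0) := by
  unfold rowCnt
  rw [dif_neg (by simp)]

theorem rowCnt_neg (r : Int) (rows : List String) (i : Int) (h : i < 0) :
    rowCnt r rows i = (0, 0) := by
  unfold rowCnt
  rw [dif_neg (by omega)]

theorem rowCnt_cons_zero (r : Int) (row : String) (rest : List String) :
    rowCnt r (row :: rest) 0 = pvCnt r 0 (pvExpand row.toList) := by
  unfold rowCnt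
  rw [dif_pos ⟨le_rfl, by simp⟩]
  rfl

theorem rowCnt_cons_ne (r : Int) (row : String) (rest : List String) (i : Int) (h : i ≠ 0) :
    rowCnt r (row :: rest) i = rowCnt r rest (i - 1) := by
  by_cases hneg : i < 0
  · rw [rowCnt_neg _ _ _ hneg, rowCnt_neg _ _ _ (by omega)]
  · have hpos : 0 < i := by omega
    unfold rowCnt
    by_cases hlt : (i - 1).toNat < rest.length
    · rw [dif_pos ⟨by omega, by simp [List.length_cons]; omega⟩, dif_pos ⟨by omega, hlt⟩]
      have ht : i.toNat = (i - 1).toNat + 1 := by omega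
      simp only [ht, List.getElem_cons_succ]
    · rw [dif_neg (by simp [List.length_cons]; omega), dif_neg (by omega)]

theorem S_char (rows : List String) : ∀ (r : Int),
    S rows r = addP (rowCnt 5 rows (r - 5)) (rowCnt 4 rows (r - 4)) := by
  induction rows with
  | nil => intro r; rw [rowCnt_nil, rowCnt_nil]; rfl
  | cons row rest ih =>
      intro r
      show addP (pvCnt r 0 (pvExpand row.toList)) (S rest (r - 1)) = _
      rw [ih (r - 1)]
      by_cases h5 : r = 5
      · subst h5
        rw [show (5 : Int) - 1 - 5 = -1 from by norm_num,
            show (5 : Int) - 1 - 4 = 0 from by norm_num,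
            show (5 : Int) - 5 = 0 from by norm_num,
            show (5 : Int) - 4 = 1 from by norm_num,
            rowCnt_neg 5 rest (-1) (by norm_num), rowCnt_cons_zero,
            rowCnt_cons_ne _ _ _ _ (by norm_num),
            show (1 : Int) - 1 = 0 from by norm_num]
        try simp [addP]
      · by_cases h4 : r = 4
        · subst h4
          rw [show (4 : Int) - 1 - 5 = -2 from by norm_num,
              show (4 : Int) - 1 - 4 = -1 from by norm_num,
              show (4 : Int) - 5 = -1 from by norm_num,
              show (4 : Int) - 4 = 0 from by norm_num,
              rowCnt_neg 5 rest (-2) (by norm_num), rowCnt_neg 4 rest (-1) (by norm_num),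
              rowCnt_neg 5 _ (-1) (by norm_num), rowCnt_cons_zero]
          try simp [addP]
        · rw [pvCnt_zero r h4 h5, addP_zero_left]
          rw [rowCnt_cons_ne _ _ _ _ (by omega), rowCnt_cons_ne _ _ _ _ (by omega)]
          congr 1 <;> congr 1 <;> ring

-- B's classification of the cell at Nat index f
def bCell (cells : List (Option Char)) (f : Nat) : Int × Int :=
  match cells[f]? with
  | some (some c) => pvContrib c
  | _ => (0, 0)

theorem contribAt_nat (cells : List (Option Char)) (n : Nat) :
    contribAt cells (n : Int) = bCell cells n := by
  unfold contribAt bCell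
  rw [if_pos (by positivity)]
  simp

-- B's contribution of board row i (out-of-range rows contributing zero)
def bRow (rows : List String) (i : Nat) : Int × Int :=
  if h : i < rows.length then
    addP (bCell (pvExpand (rows[i]'h).toList) 3) (bCell (pvExpand (rows[i]'h).toList) 4)
  else (0, 0)

theorem bRowStep_eq (rows : List String) (st : Int × Int) (i : Nat) :
    bRowStep rows st i = addP st (bRow rows i) := by
  unfold bRowStep bRow
  by_cases h : i < rows.length
  · rw [dif_pos h, dif_pos h]
    rcases h3 : (pvExpand (rows[i]'h).toList)[3]? with _ | o3 <;>
      rcases h4 : (pvExpand (rows[i]'h).toList)[4]? with _ | o4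
    all_goals try rcases o3 with _ | c3
    all_goals try rcases o4 with _ | c4
    all_goals simp only [List.foldl_cons, List.foldl_nil, h3, h4, bCell]
    all_goals first
      | (split_ifs <;> simp [addP, pvContrib, *] <;> try omega)
      | simp [addP]
  · rw [dif_neg h, dif_neg h, addP_zero_right]

theorem B_eq (rows : List String) :
    count_pieces_in_center_alt rows = addP (bRow rows 3) (bRow rows 4) := by
  unfold count_pieces_in_center_alt
  rw [List.foldl_cons, List.foldl_cons, List.foldl_nil,
      bRowStep_eq, bRowStep_eq, addP_zero_left]

theorem rowCnt_eq_bRow (r : Int) (hr : r = 4 ∨ r = 5) (rows : List String) (i : Nat) :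
    rowCnt r rows (i : Int) = bRow rows i := by
  unfold rowCnt bRow
  simp only [Int.toNat_natCast]
  by_cases h : i < rows.length
  · rw [dif_pos ⟨by positivity, h⟩, dif_pos h]
    rw [pvCnt_at r hr _ 0,
        show (3 : Int) - 0 = ((3 : Nat) : Int) from by norm_num,
        show (4 : Int) - 0 = ((4 : Nat) : Int) from by norm_num,
        contribAt_nat, contribAt_nat]
  · rw [dif_neg (by omega), dif_neg h]

-- ===== VERDICT (by name: the statement is the Claim_ definition above) =====
theorem count_pieces_in_center_spec : Claim_equal_count_pieces_in_center := by
  intro rows _hdom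
  show count_pieces_in_center rows = count_pieces_in_center_alt rows
  rw [A_eq, outer_eq rows 0 0 8]
  show addP (0, 0) (S rows 8) = _
  rw [addP_zero_left, S_char rows 8, B_eq,
      show (8 : Int) - 5 = ((3 : Nat) : Int) from by norm_num,
      show (8 : Int) - 4 = ((4 : Nat) : Int) from by norm_num,
      rowCnt_eq_bRow 5 (Or.inr rfl), rowCnt_eq_bRow 4 (Or.inl rfl)]
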